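-- pv_equiv track=rewrite | github.com/har6451/My-Python-Projects | Automorphic Number.py | automorphic
-- ===== SOURCE A (Python) =====
-- def automorphic(number):
--     length = len(str(number))
--     square = number * number
--     while number > 0:
--         r = square % (10 ** length)
--         if r == number:
--             return True
--         else:
--             return False
-- ===== SOURCE B (Python) =====
-- def automorphic(number):
--     if number > 0:
--         square = number * number
--         n = number
--         while n > 0:
--             if n % 10 != square % 10:
--                 return False
--             n //= 10
--             square //= 10
--         return True
-- ===== Notes on version B (the rewrite author's own statement) =====
-- stated objective: alternative
-- what changed: Replaces A's one-shot comparison of square % 10**len(str(number)) against number by a digit-by-digit loop that repeatedly compares the last decimal digit of number and of its square and divides both by ten, never computing len(str(...)) or a power-of-ten modulus; Pre_ excludes number <= 0, where A falls through its loop and returns None instead of a bool.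
-- outside the precondition, e.g. on automorphic(0): A returns None, B returns None; on automorphic(-5): A returns None, B returns None
import Mathlib
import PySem

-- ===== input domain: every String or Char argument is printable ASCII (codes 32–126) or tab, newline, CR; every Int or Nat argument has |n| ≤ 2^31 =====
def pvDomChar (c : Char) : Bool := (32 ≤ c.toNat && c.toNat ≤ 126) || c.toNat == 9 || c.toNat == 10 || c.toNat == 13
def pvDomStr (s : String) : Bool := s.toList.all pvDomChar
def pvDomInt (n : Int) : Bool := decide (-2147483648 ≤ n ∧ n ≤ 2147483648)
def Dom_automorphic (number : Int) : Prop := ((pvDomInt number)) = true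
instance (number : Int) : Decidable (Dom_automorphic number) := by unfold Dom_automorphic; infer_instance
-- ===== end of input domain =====

-- B replaces A's one-shot test square % 10**len(str(n)) == n by a digit-by-digit loop
-- comparing the last digits of n and its square; equal on all positive inputs (Pre_), not faster.


-- ===== PORT A =====
-- literal port: length = len(str(number)); square = number*number; the while loop body
-- runs at most once (both branches return), so it is an if; for number ≤ 0 Python
-- returns None (no Bool) — excluded by Pre_, the port returns false there.
def automorphic (number : Int) : Bool :=
  let length := (PySem.Int.toChars number).length
  let square := number * number
  if number > 0 then
    let r := PySem.Int.mod square (10 ^ length)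
    if r = number then true else false
  else false

-- ===== PORT B =====
-- Source B's while loop: compare last digits of n and square, divide both by 10.
def autLoop (n square : Int) : Bool :=
  if _h : n > 0 then
    if PySem.Int.mod n 10 ≠ PySem.Int.mod square 10 then false
    else autLoop (PySem.Int.floordiv n 10) (PySem.Int.floordiv square 10)
  else true
termination_by n.toNat
decreasing_by
  rw [PySem.Int.floordiv_eq_ediv_of_pos (by norm_num)]
  omega

-- literal port of Source B under the same guard (None for number ≤ 0 → false, excluded by Pre_).
def automorphic_alt (number : Int) : Bool :=
  if number > 0 then autLoop number (number * number) else false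

-- ===== PRECONDITION & SPEC =====
-- Pre_ excludes number ≤ 0, where both Pythons fall through and return None,
-- which is not a value of the declared Bool type.
def Pre_automorphic (number : Int) : Prop := 0 < number
instance (number : Int) : Decidable (Pre_automorphic number) := by unfold Pre_automorphic; infer_instance
def pvWitness_automorphic : Int := (5)
def Spec_automorphic (number : Int) (out : Bool) : Prop := out = automorphic_alt number
instance (number : Int) (out : Bool) : Decidable (Spec_automorphic number out) := by unfold Spec_automorphic; infer_instance

-- ===== CLAIM (what is proved, stated in full; the proofs are below) =====
def Claim_equal_automorphic : Prop := ∀ (number : Int), Dom_automorphic number → Pre_automorphic number → Spec_automorphic number (automorphic number)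

-- ===== LEMMAS AND PROOFS =====

lemma pv_toDigitsCore_eq (f : Nat) : ∀ (n : Nat) (l : List Char), 0 < n → n < 10 ^ f →
    Nat.toDigitsCore 10 f n l = ((Nat.digits 10 n).map Nat.digitChar).reverse ++ l := by
  induction f with
  | zero => intro n l hn hf; simp at hf; omega
  | succ f ih =>
    intro n l hn hf
    simp only [Nat.toDigitsCore]
    by_cases h : n / 10 = 0
    · have hlt : n < 10 := by omega
      rw [if_pos h, Nat.digits_of_lt 10 n (by omega) hlt, Nat.mod_eq_of_lt hlt]
      simp
    · rw [pow_succ] at hf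
      rw [if_neg h, ih (n / 10) _ (Nat.pos_of_ne_zero h) (by omega)]
      rw [Nat.digits_def' (by norm_num : (1:Nat) < 10) hn]
      simp

lemma pv_toDigits_eq (n : Nat) (h : 0 < n) :
    Nat.toDigits 10 n = ((Nat.digits 10 n).map Nat.digitChar).reverse := by
  have hlt : n < 10 ^ (n + 1) :=
    lt_of_lt_of_le (Nat.lt_pow_self (by norm_num))
      (Nat.pow_le_pow_right (by norm_num) (Nat.le_succ n))
  simpa [Nat.toDigits] using pv_toDigitsCore_eq (n + 1) n [] h hlt

lemma pv_toChars_len (n : Int) (h : 0 < n) :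
    (PySem.Int.toChars n).length = (Nat.digits 10 n.toNat).length := by
  rw [PySem.Int.toChars, if_neg (by omega), pv_toDigits_eq n.toNat (by omega)]
  simp

lemma pv_mod_split (a M : Nat) (hM : 0 < M) : a % (10 * M) = a % 10 + 10 * (a / 10 % M) := by
  have h1 := Nat.div_add_mod a 10
  have h2 := Nat.div_add_mod (a / 10) M
  have h3 : a % 10 < 10 := Nat.mod_lt _ (by norm_num)
  have h4 : a / 10 % M < M := Nat.mod_lt _ hM
  have he : a = (a / 10 / M) * (10 * M) + (a % 10 + 10 * (a / 10 % M)) := by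
    nlinarith [h1, h2]
  conv_lhs => rw [he]
  rw [Nat.add_comm, Nat.add_mul_mod_self_right]
  exact Nat.mod_eq_of_lt (by omega)

-- the loop computes exactly "a ends (in base 10) with the digits of b"
lemma pv_autLoop_nat : ∀ b a : Nat,
    autLoop (b : Int) (a : Int) = decide (a % 10 ^ (Nat.digits 10 b).length = b) := by
  intro b
  induction b using Nat.strong_induction_on with
  | _ b ih =>
    intro a
    rw [autLoop]
    by_cases hb : 0 < b
    · rw [dif_pos (by exact_mod_cast hb)]
      rw [show (10:Int) = ((10:Nat):Int) from rfl]
      rw [PySem.Int.mod_natCast, PySem.Int.mod_natCast,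
        PySem.Int.floordiv_natCast, PySem.Int.floordiv_natCast]
      have hlen : (Nat.digits 10 b).length = (Nat.digits 10 (b / 10)).length + 1 := by
        rw [Nat.digits_def' (by norm_num : (1:Nat) < 10) hb]; simp
      have hM : 0 < 10 ^ (Nat.digits 10 (b / 10)).length := pow_pos (by norm_num) _
      by_cases hd : b % 10 = a % 10
      · rw [if_neg (by simp [hd]), ih (b / 10) (by omega) (a / 10)]
        have key : a % 10 ^ (Nat.digits 10 b).length = b
            ↔ a / 10 % 10 ^ (Nat.digits 10 (b / 10)).length = b / 10 := by
          rw [hlen, pow_succ', pv_mod_split a _ hM]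
          generalize a / 10 % 10 ^ (Nat.digits 10 (b / 10)).length = x
          omega
        simp [key]
      · rw [if_pos (by simp; omega)]
        have hne : ¬ a % 10 ^ (Nat.digits 10 b).length = b := by
          rw [hlen, pow_succ', pv_mod_split a _ hM]
          generalize a / 10 % 10 ^ (Nat.digits 10 (b / 10)).length = x
          omega
        simp [hne]
    · rw [dif_neg (by omega)]
      have hb0 : b = 0 := by omega
      simp [hb0, Nat.mod_one]

-- ===== VERDICT (by name: the statement is the Claim_ definition above) =====
theorem automorphic_spec : Claim_equal_automorphic := by
  intro number _ hpre
  unfold Spec_automorphic automorphic automorphic_alt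
  have hn : 0 < number := hpre
  rw [if_pos (show number > 0 from hn), if_pos (show number > 0 from hn)]
  have hsq : number * number = ((number.toNat * number.toNat : Nat) : Int) := by
    push_cast; rw [Int.toNat_of_nonneg (le_of_lt hn)]
  have hB : autLoop number (number * number)
      = decide ((number.toNat * number.toNat) % 10 ^ (Nat.digits 10 number.toNat).length
          = number.toNat) := by
    rw [show number = ((number.toNat : Nat) : Int) by omega] at hsq ⊢
    rw [hsq]
    exact pv_autLoop_nat number.toNat (number.toNat * number.toNat)
  have harith : (PySem.Int.mod (number * number) (10 ^ (PySem.Int.toChars number).length) = number)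
      ↔ (number.toNat * number.toNat) % 10 ^ (Nat.digits 10 number.toNat).length = number.toNat := by
    rw [PySem.Int.mod_eq_emod_of_pos (show (0:Int) < 10 ^ (PySem.Int.toChars number).length by positivity)]
    rw [pv_toChars_len number hn, hsq]
    rw [show number = (number.toNat : Int) by omega]
    norm_cast
  by_cases hcond : PySem.Int.mod (number * number) (10 ^ (PySem.Int.toChars number).length) = number
  · rw [if_pos hcond, hB, harith.mp hcond]; simp
  · rw [if_neg hcond, hB]
    have := (not_iff_not.mpr harith).mp hcond
    simp [this]
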